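-- pv_equiv track=rewrite | github.com/MalongSuper/Python-Programming---Practice- | SocialSecurityNumber.py | number_only
-- ===== SOURCE A (Python) =====
-- import string
--
-- def number_only(d1, d2, d3):  # Define function for valid number
--     d1_list = list(d1)
--     d2_list = list(d2)
--     d3_list = list(d3)
--     string_list_punc = list(string.punctuation)
--     string_list_let = list(string.ascii_letters)
--     # If any letter is found, the SSN is invalid
--     if (any(char in d1_list for char in string_list_let)
--             or any(char in d2_list for char in string_list_let)
--             or any(char in d3_list for char in string_list_let)):
--         return False
--     # If punctuation is found, the SSN is invalid
--     elif (any(char in d1_list for char in string_list_punc)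
--           or any(char in d2_list for char in string_list_punc)
--           or any(char in d3_list for char in string_list_punc)):
--         return False
--     else:
--         return True
-- ===== SOURCE B (Python) =====
-- import string
--
-- _FORBIDDEN = set(string.ascii_letters) | set(string.punctuation)
--
-- def number_only(d1, d2, d3):
--     # one pass over the input characters of each string, O(1) set lookup
--     return all(c not in _FORBIDDEN for s in (d1, d2, d3) for c in s)
-- ===== Notes on version B (the rewrite author's own statement) =====
-- stated objective: faster
-- what changed: A loops over the fixed 84-character letters/punctuation alphabets and membership-tests each against the input's character lists in two separate phases; B makes a single pass over the input characters, testing each against one precomputed forbidden set with O(1) lookup.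
import Mathlib
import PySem

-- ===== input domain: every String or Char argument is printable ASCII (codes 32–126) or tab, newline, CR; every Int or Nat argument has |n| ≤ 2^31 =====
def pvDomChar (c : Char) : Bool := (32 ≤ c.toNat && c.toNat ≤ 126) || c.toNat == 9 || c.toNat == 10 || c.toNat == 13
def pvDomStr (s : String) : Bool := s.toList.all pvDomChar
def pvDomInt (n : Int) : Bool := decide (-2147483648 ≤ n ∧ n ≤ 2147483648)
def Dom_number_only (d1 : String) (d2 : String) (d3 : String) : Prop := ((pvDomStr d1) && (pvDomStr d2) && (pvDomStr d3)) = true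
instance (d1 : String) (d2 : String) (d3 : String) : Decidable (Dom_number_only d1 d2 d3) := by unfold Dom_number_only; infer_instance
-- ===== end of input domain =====

-- B is the idiomatic form: one pass over the input characters against a single precomputed
-- forbidden set, instead of A's two scans of the fixed alphabets against the input lists.

-- ===== PORT A =====
-- string.punctuation
def pvPunct : List Char := "!\"#$%&'()*+,-./:;<=>?@[\\]^_`{|}~".toList
-- string.ascii_letters
def pvLetters : List Char := "abcdefghijklmnopqrstuvwxyzABCDEFGHIJKLMNOPQRSTUVWXYZ".toList

def number_only (d1 : String) (d2 : String) (d3 : String) : Bool :=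
  let d1_list := d1.toList
  let d2_list := d2.toList
  let d3_list := d3.toList
  let string_list_punc := pvPunct
  let string_list_let := pvLetters
  if string_list_let.any (fun c => d1_list.contains c)
      || string_list_let.any (fun c => d2_list.contains c)
      || string_list_let.any (fun c => d3_list.contains c) then
    false
  else if string_list_punc.any (fun c => d1_list.contains c)
      || string_list_punc.any (fun c => d2_list.contains c)
      || string_list_punc.any (fun c => d3_list.contains c) then
    false
  else
    true

-- ===== PORT B =====
-- set(string.ascii_letters) | set(string.punctuation)
def pvForbidden : PySem.Set Char :=
  PySem.Set.union (PySem.Set.ofList "abcdefghijklmnopqrstuvwxyzABCDEFGHIJKLMNOPQRSTUVWXYZ".toList)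
                  (PySem.Set.ofList "!\"#$%&'()*+,-./:;<=>?@[\\]^_`{|}~".toList)

def number_only_alt (d1 : String) (d2 : String) (d3 : String) : Bool :=
  [d1, d2, d3].all (fun s => s.toList.all (fun c => !(PySem.Set.contains pvForbidden c)))

-- ===== PRECONDITION & SPEC =====
def Spec_number_only (d1 : String) (d2 : String) (d3 : String) (out : Bool) : Prop := out = number_only_alt d1 d2 d3
instance (d1 : String) (d2 : String) (d3 : String) (out : Bool) : Decidable (Spec_number_only d1 d2 d3 out) := by unfold Spec_number_only; infer_instance

-- ===== CLAIM (what is proved, stated in full; the proofs are below) =====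
def Claim_equal_number_only : Prop := ∀ (d1 : String) (d2 : String) (d3 : String), Dom_number_only d1 d2 d3 → Spec_number_only d1 d2 d3 (number_only d1 d2 d3)

-- ===== LEMMAS AND PROOFS =====

-- a character is in the forbidden set iff it is a letter or punctuation
theorem mem_pvForbidden (c : Char) :
    PySem.Set.contains pvForbidden c = (pvLetters.contains c || pvPunct.contains c) := by
  simp only [pvForbidden, pvLetters, pvPunct, PySem.Set.contains, List.contains_eq_mem,
    PySem.Set.mem_union, PySem.Set.mem_ofList]
  by_cases h1 : c ∈ "abcdefghijklmnopqrstuvwxyzABCDEFGHIJKLMNOPQRSTUVWXYZ".toList <;>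
    by_cases h2 : c ∈ "!\"#$%&'()*+,-./:;<=>?@[\\]^_`{|}~".toList <;>
    simp_all

-- scanning the alphabet for a hit in l = scanning l for a forbidden character
theorem any_comm (xs l : List Char) :
    xs.any (fun c => l.contains c) = l.any (fun c => xs.contains c) := by
  apply Bool.eq_iff_iff.mpr
  simp only [List.any_eq_true, List.contains_eq_mem, decide_eq_true_eq]
  constructor
  · rintro ⟨c, hx, hl⟩; exact ⟨c, hl, hx⟩
  · rintro ⟨c, hl, hx⟩; exact ⟨c, hx, hl⟩

theorem per_string (l : List Char) :
    l.all (fun c => !(PySem.Set.contains pvForbidden c))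
      = (!(pvLetters.any (fun c => l.contains c)) && !(pvPunct.any (fun c => l.contains c))) := by
  rw [any_comm, any_comm]
  apply Bool.eq_iff_iff.mpr
  simp only [List.all_eq_true, Bool.and_eq_true, Bool.not_eq_true',
    List.any_eq_false, mem_pvForbidden, Bool.or_eq_false_iff,
    List.contains_eq_mem, decide_eq_true_eq, decide_eq_false_iff_not]
  constructor
  · intro h
    exact ⟨fun c hc hl => (h c hl).1 hc, fun c hc hl => (h c hl).2 hc⟩
  · rintro ⟨h1, h2⟩ c hc
    exact ⟨fun hm => h1 c hm hc, fun hm => h2 c hm hc⟩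

-- ===== VERDICT (by name: the statement is the Claim_ definition above) =====
theorem number_only_spec : Claim_equal_number_only := by
  intro d1 d2 d3 _
  show number_only d1 d2 d3 = number_only_alt d1 d2 d3
  simp only [number_only, number_only_alt, List.all_cons, List.all_nil, per_string]
  cases h1l : pvLetters.any (fun c => d1.toList.contains c) <;>
  cases h2l : pvLetters.any (fun c => d2.toList.contains c) <;>
  cases h3l : pvLetters.any (fun c => d3.toList.contains c) <;>
  cases h1p : pvPunct.any (fun c => d1.toList.contains c) <;>
  cases h2p : pvPunct.any (fun c => d2.toList.contains c) <;>
  cases h3p : pvPunct.any (fun c => d3.toList.contains c) <;> simp
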